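-- pv_equiv track=rewrite | github.com/JvMainoth/UFF | UFF-Lab.Resolução de Prob.-Python/P2 - Lab resolção de problemas/EXE4.py | procuraBinaria
-- ===== SOURCE A (Python) =====
-- def acharItens(diasCho,fran,temp):
--     achados = 0
--     for i in range(fran):
--         achados += temp//diasCho[i]
--     return achados
--
-- def procuraBinaria(diasCho, cho, fran, maior):
--     menor = 1
--     while menor < maior:
--         meio = (menor + maior) >> 1
--         item = acharItens(diasCho, cho, meio)
--         if item < fran:
--             menor = meio + 1
--         else:
--             maior = meio
--     return maior
-- ===== SOURCE B (Python) =====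
-- def acharItens(diasCho, fran, temp):
--     return sum(temp // diasCho[i] for i in range(fran))
--
-- def procuraBinaria(diasCho, cho, fran, maior):
--     # bit-by-bit descent: accumulate the longest below-threshold prefix into pos
--     u = maior - 1              # candidates are 1 .. u; if none, answer is maior itself
--     if u <= 0:
--         return maior
--     step = 1
--     while step * 2 <= u:       # largest power of two not exceeding u
--         step *= 2
--     pos = 0                    # invariant: days 1..pos all yield fewer than fran items
--     while step > 0:
--         nxt = pos + step
--         if nxt <= u and acharItens(diasCho, cho, nxt) < fran:
--             pos = nxt
--         step //= 2
--     return 1 + pos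
-- ===== Notes on version B (the rewrite author's own statement) =====
-- stated objective: alternative
-- what changed: Replaces the shrinking-interval (menor,maior) midpoint binary search by a bitwise descent: B precomputes the largest power of two not exceeding the candidate range and accumulates, bit by bit from the highest step down, the longest prefix of days that yield fewer than fran items, returning 1 + that prefix length.
-- outside the precondition, e.g. on procuraBinaria([2, -2], 2, 0, 10): A returns 8, B returns 2
import Mathlib
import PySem

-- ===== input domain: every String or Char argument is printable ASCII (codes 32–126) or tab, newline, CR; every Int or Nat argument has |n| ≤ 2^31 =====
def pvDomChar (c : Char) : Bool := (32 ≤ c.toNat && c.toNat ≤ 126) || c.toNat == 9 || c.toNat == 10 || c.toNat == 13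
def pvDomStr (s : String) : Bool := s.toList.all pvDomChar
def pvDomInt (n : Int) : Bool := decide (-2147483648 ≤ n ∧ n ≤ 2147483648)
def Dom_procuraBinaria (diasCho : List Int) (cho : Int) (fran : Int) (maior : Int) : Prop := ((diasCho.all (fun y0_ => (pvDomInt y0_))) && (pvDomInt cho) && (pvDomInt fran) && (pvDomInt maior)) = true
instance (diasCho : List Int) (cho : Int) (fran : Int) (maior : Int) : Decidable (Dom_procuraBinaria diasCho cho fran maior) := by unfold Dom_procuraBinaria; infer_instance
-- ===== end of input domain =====

-- B replaces A's midpoint binary search by a bitwise (step-halving) descent of the answer; alternative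
-- formulation of the same cost, no side effects in either program.

-- ===== PORT A =====
-- Python midpoint (menor + maior) >> 1: Lean's '>>> (1 : Nat)' on Int is Python's arithmetic shift (exact).
theorem pvMidBounds (menor maior : Int) (h : menor < maior) :
    menor ≤ (menor + maior) >>> (1 : Nat) ∧ (menor + maior) >>> (1 : Nat) < maior := by
  rw [Int.shiftRight_eq_div_pow]
  norm_num
  omega

def acharItens (diasCho : List Int) (fran : Int) (temp : Int) : Int :=
  (PySem.List.pyRange 0 fran 1).foldl
    (fun achados i => achados + PySem.Int.floordiv temp (PySem.List.pyGetD diasCho i 0)) 0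

def pbLoop (diasCho : List Int) (cho fran menor maior : Int) : Int :=
  if h : menor < maior then
    let meio := (menor + maior) >>> (1 : Nat)
    let item := acharItens diasCho cho meio
    if item < fran then pbLoop diasCho cho fran (meio + 1) maior
    else pbLoop diasCho cho fran menor meio
  else maior
termination_by (maior - menor).toNat
decreasing_by
  · have := pvMidBounds menor maior h; omega
  · have := pvMidBounds menor maior h; omega

def procuraBinaria (diasCho : List Int) (cho : Int) (fran : Int) (maior : Int) : Int :=
  pbLoop diasCho cho fran 1 maior

-- ===== PORT B =====
def acharItensAlt (diasCho : List Int) (fran : Int) (temp : Int) : Int :=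
  ((PySem.List.pyRange 0 fran 1).map
    (fun i => PySem.Int.floordiv temp (PySem.List.pyGetD diasCho i 0))).sum

-- while step * 2 <= u: step *= 2   (the 0 < step guard only makes the recursion total; B always starts at 1)
def growStep (u step : Int) : Int :=
  if h : 0 < step ∧ step * 2 ≤ u then growStep u (step * 2) else step
termination_by (u - step).toNat
decreasing_by omega

def altLoop (diasCho : List Int) (cho fran u pos step : Int) : Int :=
  if h : 0 < step then
    let nxt := pos + step
    if nxt ≤ u ∧ acharItensAlt diasCho cho nxt < fran then
      altLoop diasCho cho fran u nxt (PySem.Int.floordiv step 2)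
    else
      altLoop diasCho cho fran u pos (PySem.Int.floordiv step 2)
  else 1 + pos
termination_by step.toNat
decreasing_by
  all_goals rw [PySem.Int.floordiv_eq_ediv_of_pos (by omega : (0:Int) < 2)]; omega

def procuraBinaria_alt (diasCho : List Int) (cho : Int) (fran : Int) (maior : Int) : Int :=
  let u := maior - 1
  if u ≤ 0 then maior
  else altLoop diasCho cho fran u 0 (growStep u 1)

-- ===== PRECONDITION & SPEC =====
-- Pre_ excludes inputs on which the loop body actually runs (maior > 1) with bad day counts among the
-- first cho entries: cho > len(diasCho) makes A raise IndexError and a zero entry ZeroDivisionError,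
-- while non-positive entries are outside the natural domain (they are day counts) and make the searched
-- predicate non-monotone, so A's binary search returns an accidental value there that no search-based
-- reimplementation would be specified to match.
def Pre_procuraBinaria (diasCho : List Int) (cho : Int) (fran : Int) (maior : Int) : Prop :=
  maior ≤ 1 ∨ (cho ≤ (diasCho.length : Int) ∧ ∀ d ∈ diasCho.take cho.toNat, 0 < d)
instance (diasCho : List Int) (cho : Int) (fran : Int) (maior : Int) : Decidable (Pre_procuraBinaria diasCho cho fran maior) := by unfold Pre_procuraBinaria; infer_instance

def pvWitness_procuraBinaria : List Int × Int × Int × Int := ([3, 2], 2, 5, 10)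

def Spec_procuraBinaria (diasCho : List Int) (cho : Int) (fran : Int) (maior : Int) (out : Int) : Prop := out = procuraBinaria_alt diasCho cho fran maior
instance (diasCho : List Int) (cho : Int) (fran : Int) (maior : Int) (out : Int) : Decidable (Spec_procuraBinaria diasCho cho fran maior out) := by unfold Spec_procuraBinaria; infer_instance

-- ===== CLAIM (what is proved, stated in full; the proofs are below) =====
def Claim_equal_procuraBinaria : Prop := ∀ (diasCho : List Int) (cho : Int) (fran : Int) (maior : Int), Dom_procuraBinaria diasCho cho fran maior → Pre_procuraBinaria diasCho cho fran maior → Spec_procuraBinaria diasCho cho fran maior (procuraBinaria diasCho cho fran maior)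

-- ===== LEMMAS AND PROOFS =====

-- Reference linear scan (proof-only helper): first m in [m0, maior) whose item count reaches fran,
-- else maior.  Both ports are proved equal to it.
def linFrom (diasCho : List Int) (cho fran m maior : Int) : Int :=
  if h : m < maior then
    if fran ≤ acharItens diasCho cho m then m else linFrom diasCho cho fran (m + 1) maior
  else maior
termination_by (maior - m).toNat
decreasing_by omega

theorem achar_alt_eq (diasCho : List Int) (fran temp : Int) :
    acharItensAlt diasCho fran temp = acharItens diasCho fran temp := by
  unfold acharItensAlt acharItens
  rw [← List.foldl_map, List.sum_eq_foldl]

theorem foldl_add_le (l : List Int) (g g' : Int → Int) (h : ∀ i ∈ l, g i ≤ g' i) :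
    ∀ a a' : Int, a ≤ a' →
      l.foldl (fun acc i => acc + g i) a ≤ l.foldl (fun acc i => acc + g' i) a' := by
  induction l with
  | nil => intro a a' ha; simpa using ha
  | cons hd tl ih =>
    intro a a' ha
    simp only [List.foldl_cons]
    exact ih (fun i hi => h i (List.mem_cons_of_mem _ hi)) _ _
      (by have := h hd List.mem_cons_self; omega)

theorem achar_mono (diasCho : List Int) (cho : Int) (hlen : cho ≤ (diasCho.length : Int))
    (hpos : ∀ d ∈ diasCho.take cho.toNat, 0 < d) {m m' : Int} (hmm : m ≤ m') :
    acharItens diasCho cho m ≤ acharItens diasCho cho m' := by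
  unfold acharItens
  apply foldl_add_le _ _ _ _ 0 0 le_rfl
  intro i hi
  rw [PySem.List.mem_pyRange_one] at hi
  have hd : 0 < PySem.List.pyGetD diasCho i 0 := by
    rw [PySem.List.pyGetD_eq_getElem diasCho 0 hi.1 (by omega)]
    apply hpos
    have : (diasCho.take cho.toNat)[i.toNat]'(by simp; omega) = diasCho[i.toNat]'(by omega) := by
      simp [List.getElem_take]
    rw [← this]
    exact List.getElem_mem _
  rw [PySem.Int.floordiv_eq_ediv_of_pos hd, PySem.Int.floordiv_eq_ediv_of_pos hd]
  exact Int.ediv_le_ediv hd hmm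

theorem lin_char (diasCho : List Int) (cho fran : Int) :
    ∀ (n : Nat) (m maior : Int), (maior - m).toNat = n → m ≤ maior →
      m ≤ linFrom diasCho cho fran m maior ∧ linFrom diasCho cho fran m maior ≤ maior ∧
      (∀ k, m ≤ k → k < linFrom diasCho cho fran m maior → acharItens diasCho cho k < fran) ∧
      (linFrom diasCho cho fran m maior < maior →
        fran ≤ acharItens diasCho cho (linFrom diasCho cho fran m maior)) := by
  intro n
  induction n using Nat.strong_induction_on with
  | _ n ih =>
    intro m maior hn hle
    rw [linFrom]
    by_cases h : m < maior
    · rw [dif_pos h]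
      by_cases hP : fran ≤ acharItens diasCho cho m
      · rw [if_pos hP]
        exact ⟨le_rfl, le_of_lt h, fun k hk1 hk2 => absurd hk2 (by omega), fun _ => hP⟩
      · rw [if_neg hP]
        obtain ⟨i1, i2, i3, i4⟩ := ih (maior - (m+1)).toNat (by omega) (m+1) maior rfl (by omega)
        refine ⟨by omega, i2, ?_, i4⟩
        intro k hk1 hk2
        rcases eq_or_lt_of_le hk1 with rfl | hlt
        · omega
        · exact i3 k (by omega) hk2
    · rw [dif_neg h]
      exact ⟨by omega, le_rfl, fun k hk1 hk2 => absurd hk2 (by omega), by omega⟩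

theorem lin_skip (diasCho : List Int) (cho fran : Int) :
    ∀ (n : Nat) (m m' maior : Int), (m' - m).toNat = n → m ≤ m' → m' ≤ maior →
      (∀ k, m ≤ k → k < m' → acharItens diasCho cho k < fran) →
      linFrom diasCho cho fran m maior = linFrom diasCho cho fran m' maior := by
  intro n
  induction n using Nat.strong_induction_on with
  | _ n ih =>
    intro m m' maior hn h1 h2 hall
    rcases eq_or_lt_of_le h1 with rfl | hlt
    · rfl
    · rw [linFrom, dif_pos (by omega), if_neg (by have := hall m le_rfl hlt; omega)]
      exact ih (m' - (m+1)).toNat (by omega) (m+1) m' maior rfl (by omega) h2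
        (fun k hk1 hk2 => hall k (by omega) hk2)

theorem lin_split (diasCho : List Int) (cho fran : Int) :
    ∀ (n : Nat) (menor mid maior : Int), (mid - menor).toNat = n → menor ≤ mid → mid < maior →
      fran ≤ acharItens diasCho cho mid →
      linFrom diasCho cho fran menor maior = linFrom diasCho cho fran menor mid := by
  intro n
  induction n using Nat.strong_induction_on with
  | _ n ih =>
    intro menor mid maior hn h1 h2 hP
    rcases eq_or_lt_of_le h1 with rfl | hlt
    · rw [linFrom, dif_pos h2, if_pos hP, linFrom, dif_neg (by omega)]
    · rw [linFrom, dif_pos (by omega)]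
      conv_rhs => rw [linFrom, dif_pos (by omega)]
      by_cases hQ : fran ≤ acharItens diasCho cho menor
      · rw [if_pos hQ, if_pos hQ]
      · rw [if_neg hQ, if_neg hQ]
        exact ih (mid - (menor+1)).toNat (by omega) (menor+1) mid maior rfl (by omega) h2 hP

theorem bin_eq (diasCho : List Int) (cho fran : Int)
    (hmono : ∀ m m' : Int, m ≤ m' → acharItens diasCho cho m ≤ acharItens diasCho cho m') :
    ∀ (n : Nat) (menor maior : Int), (maior - menor).toNat = n →
      pbLoop diasCho cho fran menor maior = linFrom diasCho cho fran menor maior := by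
  intro n
  induction n using Nat.strong_induction_on with
  | _ n ih =>
    intro menor maior hn
    by_cases h : menor < maior
    · obtain ⟨hb1, hb2⟩ := pvMidBounds menor maior h
      rw [pbLoop]
      simp only [dif_pos h]
      by_cases hI : acharItens diasCho cho ((menor + maior) >>> (1:Nat)) < fran
      · rw [if_pos hI]
        rw [ih (maior - ((menor + maior) >>> (1:Nat) + 1)).toNat (by omega) _ maior rfl]
        exact (lin_skip diasCho cho fran _ menor ((menor + maior) >>> (1:Nat) + 1) maior rfl
          (by omega) (by omega)
          (fun k hk1 hk2 => by have := hmono k ((menor + maior) >>> (1:Nat)) (by omega); omega)).symm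
      · rw [if_neg hI]
        rw [ih (((menor + maior) >>> (1:Nat)) - menor).toNat (by omega) menor _ rfl]
        exact (lin_split diasCho cho fran _ menor ((menor + maior) >>> (1:Nat)) maior rfl
          (by omega) hb2 (by omega)).symm
    · rw [pbLoop, dif_neg h, linFrom, dif_neg h]

theorem grow_spec : ∀ (n : Nat) (u step : Int), (u - step).toNat = n → 0 < step → step ≤ u →
    ∃ j : Nat, growStep u step = step * 2 ^ j ∧ growStep u step ≤ u ∧ u < 2 * growStep u step := by
  intro n
  induction n using Nat.strong_induction_on with
  | _ n ih =>
    intro u step hn h0 hsu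
    rw [growStep]
    by_cases h : 0 < step ∧ step * 2 ≤ u
    · rw [dif_pos h]
      obtain ⟨j, p1, p2, p3⟩ := ih (u - step * 2).toNat (by omega) u (step * 2) rfl (by omega) h.2
      exact ⟨j + 1, by rw [p1]; ring, p2, p3⟩
    · rw [dif_neg h]
      exact ⟨0, by ring, hsu, by omega⟩

theorem alt_eq (diasCho : List Int) (cho fran maior : Int)
    (hmono : ∀ m m' : Int, m ≤ m' → acharItens diasCho cho m ≤ acharItens diasCho cho m')
    (hm2 : 2 ≤ maior) :
    ∀ (j : Nat) (pos : Int), 0 ≤ pos → pos ≤ maior - 1 →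
      (∀ k, 1 ≤ k → k ≤ pos → acharItens diasCho cho k < fran) →
      linFrom diasCho cho fran 1 maior ≤ pos + 2 * 2 ^ j →
      altLoop diasCho cho fran (maior - 1) pos (2 ^ j) = linFrom diasCho cho fran 1 maior := by
  obtain ⟨c1, c2, c3, c4⟩ := lin_char diasCho cho fran (maior - 1).toNat 1 maior (by omega) (by omega)
  have hlt : ∀ x : Int, 0 ≤ x → x ≤ maior - 1 →
      (∀ k, 1 ≤ k → k ≤ x → acharItens diasCho cho k < fran) →
      x < linFrom diasCho cho fran 1 maior := by
    intro x hx0 hxu hpre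
    by_contra hcon
    push Not at hcon
    have h4 := c4 (by omega)
    have h5 := hpre _ c1 hcon
    omega
  intro j
  induction j with
  | zero =>
    intro pos h0 hu hpre hub
    rw [pow_zero, altLoop, dif_pos one_pos]
    simp only [achar_alt_eq]
    have hf : PySem.Int.floordiv 1 2 = 0 := by decide
    by_cases hc : pos + 1 ≤ maior - 1 ∧ acharItens diasCho cho (pos + 1) < fran
    · rw [if_pos hc, hf, altLoop, dif_neg (lt_irrefl 0)]
      have h1 : pos + 1 < linFrom diasCho cho fran 1 maior := by
        apply hlt (pos + 1) (by omega) (by omega)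
        intro k hk1 hk2
        rcases eq_or_lt_of_le hk2 with rfl | hk3
        · exact hc.2
        · exact hpre k hk1 (by omega)
      omega
    · rw [if_neg hc, hf, altLoop, dif_neg (lt_irrefl 0)]
      have h1 : pos < linFrom diasCho cho fran 1 maior := hlt pos h0 hu hpre
      have h2 : linFrom diasCho cho fran 1 maior ≤ pos + 1 := by
        by_contra hcon
        push Not at hcon
        have hn1 : pos + 1 ≤ maior - 1 := by omega
        have hn2 := c3 (pos + 1) (by omega) (by omega)
        exact hc ⟨hn1, hn2⟩
      omega
  | succ j ih =>
    intro pos h0 hu hpre hub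
    have hp2 : (0:Int) < 2 ^ (j+1) := by positivity
    have hps : (2:Int) ^ (j+1) = 2 * 2 ^ j := by ring
    rw [altLoop, dif_pos hp2]
    simp only [achar_alt_eq]
    have hhalf : PySem.Int.floordiv (2 ^ (j+1)) 2 = 2 ^ j := by
      rw [PySem.Int.floordiv_eq_ediv_of_pos (by norm_num), pow_succ,
        Int.mul_ediv_cancel _ (by norm_num)]
    by_cases hc : pos + 2 ^ (j+1) ≤ maior - 1 ∧ acharItens diasCho cho (pos + 2 ^ (j+1)) < fran
    · rw [if_pos hc, hhalf]
      apply ih (pos + 2 ^ (j+1)) (by omega) hc.1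
      · intro k hk1 hk2
        have := hmono k (pos + 2 ^ (j+1)) (by omega)
        have := hc.2
        omega
      · omega
    · rw [if_neg hc, hhalf]
      apply ih pos h0 hu hpre
      by_cases hcu : pos + 2 ^ (j+1) ≤ maior - 1
      · have hn2 : ¬ acharItens diasCho cho (pos + 2 ^ (j+1)) < fran := fun hx => hc ⟨hcu, hx⟩
        have : linFrom diasCho cho fran 1 maior ≤ pos + 2 ^ (j+1) := by
          by_contra hcon
          push Not at hcon
          have := c3 (pos + 2 ^ (j+1)) (by omega) (by omega)
          omega
        omega
      · omega

-- ===== VERDICT (by name: the statement is the Claim_ definition above) =====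
theorem procuraBinaria_spec : Claim_equal_procuraBinaria := by
  intro diasCho cho fran maior hdom hpre
  unfold Spec_procuraBinaria procuraBinaria procuraBinaria_alt
  by_cases hM : maior ≤ 1
  · rw [pbLoop, dif_neg (by omega)]
    simp only []
    rw [if_pos (by omega)]
  · rcases hpre with h1 | ⟨hlen, hpos⟩
    · omega
    · have hmono : ∀ m m' : Int, m ≤ m' → acharItens diasCho cho m ≤ acharItens diasCho cho m' :=
        fun m m' hm => achar_mono diasCho cho hlen hpos hm
    
      rw [bin_eq diasCho cho fran hmono (maior - 1).toNat 1 maior rfl]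
      simp only []
      rw [if_neg (by omega)]
      obtain ⟨j, g1, g2, g3⟩ := grow_spec (maior - 1 - 1).toNat (maior - 1) 1 rfl one_pos (by omega)
      rw [one_mul] at g1
      rw [g1]
      obtain ⟨c1, c2, c3, c4⟩ :=
        lin_char diasCho cho fran (maior - 1).toNat 1 maior (by omega) (by omega)
      exact (alt_eq diasCho cho fran maior hmono (by omega) j 0 le_rfl (by omega)
        (fun k hk1 hk2 => absurd hk2 (by omega)) (by omega)).symm
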